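-- pv_equiv track=rewrite | github.com/MrBrantCode/unitest_baseline | mut_generate/mist_train_cf/cf_5087/solution.py | last_k_unique_elements
-- ===== SOURCE A (Python) =====
-- def last_k_unique_elements(arr, K):
--     unique_elements = []
--     element_count = {}
--
--     for i in range(len(arr) - 1, -1, -1):
--         if arr[i] not in element_count:
--             unique_elements.append(arr[i])
--             element_count[arr[i]] = 1
--
--         if len(unique_elements) == K:
--             break
--
--     return unique_elements[::-1]
-- ===== SOURCE B (Python) =====
-- def last_k_unique_elements(arr, K):
--     # One forward pass: move-to-end dict keeps distinct values ordered by
--     # last occurrence; then take the last K (K <= 0 means all of them).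
--     d = {}
--     for x in arr:
--         d.pop(x, None)
--         d[x] = None
--     ordered = list(d)
--     return ordered[-K:] if K > 0 else ordered
-- ===== Notes on version B (the rewrite author's own statement) =====
-- stated objective: alternative
-- what changed: A scans the array backwards collecting unseen values with an early break at K and reverses at the end; B makes one forward pass with a move-to-end dict (pop+reinsert) that orders the distinct values by last occurrence and then takes the guarded [-K:] slice.
import Mathlib
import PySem

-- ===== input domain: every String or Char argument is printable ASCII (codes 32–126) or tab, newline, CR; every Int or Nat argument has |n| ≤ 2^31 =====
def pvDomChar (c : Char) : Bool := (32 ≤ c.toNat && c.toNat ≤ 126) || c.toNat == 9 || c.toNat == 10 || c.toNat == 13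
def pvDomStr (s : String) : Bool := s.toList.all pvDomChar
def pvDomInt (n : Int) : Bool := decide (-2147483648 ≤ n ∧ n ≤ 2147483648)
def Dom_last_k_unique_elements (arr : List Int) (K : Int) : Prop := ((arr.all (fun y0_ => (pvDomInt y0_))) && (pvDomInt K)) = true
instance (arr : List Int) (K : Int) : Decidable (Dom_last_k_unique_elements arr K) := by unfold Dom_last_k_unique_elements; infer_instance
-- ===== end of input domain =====

-- B replaces A's backward scan-with-break by one forward move-to-end dict pass plus a
-- guarded [-K:] slice (objective: alternative decomposition, same exact results).

-- ===== PORT A =====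
-- the backward for-loop with its break, over the index list range(len(arr)-1, -1, -1);
-- state = (unique_elements, element_count)
def lastKLoopA (arr : List Int) (K : Int) : List Int → List Int → PySem.Dict Int Int → List Int
  | [], ue, _ => ue
  | i :: rest, ue, ec =>
      let x := PySem.List.pyGetD arr i 0
      let ue' := if ec.contains x then ue else ue ++ [x]
      let ec' := if ec.contains x then ec else ec.insert x 1
      if (ue'.length : Int) = K then ue' else lastKLoopA arr K rest ue' ec'

def last_k_unique_elements (arr : List Int) (K : Int) : List Int :=
  -- unique_elements[::-1]
  (PySem.List.slice? (lastKLoopA arr K (PySem.List.pyRange ((arr.length : Int) - 1) (-1) (-1)) [] PySem.Dict.empty) none none (-1)).getD []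

-- ===== PORT B =====
-- d.pop(x, None); d[x] = None  →  erase then insert (value irrelevant)
def last_k_unique_elements_alt (arr : List Int) (K : Int) : List Int :=
  let d := arr.foldl (fun d x => (d.erase x).insert x (0 : Int)) PySem.Dict.empty
  let ordered := d.keys
  if 0 < K then PySem.List.slice ordered (some (-K)) none else ordered

-- ===== PRECONDITION & SPEC =====
def Spec_last_k_unique_elements (arr : List Int) (K : Int) (out : List Int) : Prop := out = last_k_unique_elements_alt arr K
instance (arr : List Int) (K : Int) (out : List Int) : Decidable (Spec_last_k_unique_elements arr K out) := by unfold Spec_last_k_unique_elements; infer_instance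

-- ===== CLAIM (what is proved, stated in full; the proofs are below) =====
def Claim_equal_last_k_unique_elements : Prop := ∀ (arr : List Int) (K : Int), Dom_last_k_unique_elements arr K → Spec_last_k_unique_elements arr K (last_k_unique_elements arr K)

-- ===== LEMMAS AND PROOFS =====

-- first-occurrence dedup (specification intermediate)
def pvDed : List Int → List Int
  | [] => []
  | x :: r => x :: (pvDed r).filter (fun y => y != x)

-- A's loop with the elements already fetched
def pvLoopV (K : Int) : List Int → List Int → PySem.Dict Int Int → List Int
  | [], ue, _ => ue
  | x :: rest, ue, ec =>
      let ue' := if ec.contains x then ue else ue ++ [x]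
      let ec' := if ec.contains x then ec else ec.insert x 1
      if (ue'.length : Int) = K then ue' else pvLoopV K rest ue' ec'

-- dedup of l skipping elements of seen, extending seen as it goes
def pvDedFrom (seen : List Int) : List Int → List Int
  | [] => []
  | x :: r => if x ∈ seen then pvDedFrom seen r else x :: pvDedFrom (seen ++ [x]) r

theorem pvLoopV_cons (K x : Int) (r ue : List Int) (ec : PySem.Dict Int Int) :
    pvLoopV K (x :: r) ue ec =
      (if ((if ec.contains x then ue else ue ++ [x]).length : Int) = K
       then (if ec.contains x then ue else ue ++ [x])
       else pvLoopV K r (if ec.contains x then ue else ue ++ [x])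
              (if ec.contains x then ec else ec.insert x 1)) := rfl

theorem pvLoopA_eq_loopV (arr : List Int) (K : Int) (is : List Int) :
    ∀ ue ec, lastKLoopA arr K is ue ec = pvLoopV K (is.map (fun i => PySem.List.pyGetD arr i 0)) ue ec := by
  induction is with
  | nil => intro ue ec; rfl
  | cons i rest ih =>
      intro ue ec
      simp only [lastKLoopA, List.map_cons, pvLoopV]
      split <;> split <;> first | rfl | exact ih _ _

theorem pvMap_range_eq_reverse (arr : List Int) :
    (PySem.List.pyRange ((arr.length : Int) - 1) (-1) (-1)).map (fun i => PySem.List.pyGetD arr i 0) = arr.reverse := by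
  rw [PySem.List.pyRange_neg_one_eq_reverse]
  have h1 : (-1 : Int) + 1 = 0 := by ring
  have h2 : ((arr.length : Int) - 1) + 1 = (arr.length : Int) := by ring
  rw [h1, h2, List.map_reverse, PySem.List.map_pyGetD_pyRange_zero']

theorem pvContains_append_singleton (seen : List Int) (x y : Int) :
    (!(seen ++ [x]).contains y) = (!seen.contains y && y != x) := by
  simp only [List.contains_append, Bool.not_or, List.contains_cons, List.contains_nil,
    Bool.or_false, bne]

theorem pvDedFrom_eq_filter (l : List Int) :
    ∀ seen, pvDedFrom seen l = (pvDed l).filter (fun y => !(seen.contains y)) := by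
  induction l with
  | nil => intro seen; rfl
  | cons x r ih =>
      intro seen
      by_cases hx : x ∈ seen
      · have hc : (seen.contains x) = true := by simpa using hx
        simp only [pvDedFrom, if_pos hx, pvDed, List.filter_cons, hc, Bool.not_true,
          Bool.false_eq_true, List.filter_filter]
        rw [ih seen]
        apply List.filter_congr
        intro y _
        by_cases hy : y ∈ seen
        · simp [hy]
        · have hyx : (y != x) = true := by
            simp only [bne_iff_ne, ne_eq]; intro h; exact hy (h ▸ hx)
          simp [hy, hyx]
      · have hc : (seen.contains x) = false := by simpa using hx
        simp only [pvDedFrom, if_neg hx, pvDed, List.filter_cons, hc, Bool.not_false,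
          List.filter_filter]
        rw [ih (seen ++ [x])]
        congr 1
        apply List.filter_congr
        intro y _
        exact pvContains_append_singleton seen x y

theorem pvLoopV_eq (K : Int) (l : List Int) :
    ∀ (ue : List Int) (ec : PySem.Dict Int Int),
      (∀ x : Int, ec.contains x = true ↔ x ∈ ue) →
      (0 < K → (ue.length : Int) < K) →
      pvLoopV K l ue ec =
        if 0 < K then (ue ++ pvDedFrom ue l).take K.toNat else ue ++ pvDedFrom ue l := by
  induction l with
  | nil =>
      intro ue ec _ hlen
      simp only [pvLoopV, pvDedFrom, List.append_nil]
      split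
      · next hK =>
          have := hlen hK
          have : ue.length ≤ K.toNat := by omega
          exact (List.take_of_length_le this).symm
      · rfl
  | cons x r ih =>
      intro ue ec hinv hlen
      by_cases hc : ec.contains x = true
      · -- x already seen: no append, no dict change
        have hmem : x ∈ ue := (hinv x).mp hc
        have hpos : 0 < ue.length := List.length_pos_of_mem hmem
        have hne : ¬ ((ue.length : Int) = K) := by
          by_cases hK : 0 < K
          · have := hlen hK; omega
          · omega
        rw [pvLoopV_cons]
        simp only [hc, if_true, if_neg hne]
        rw [ih ue ec hinv hlen]
        simp only [pvDedFrom, if_pos hmem]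
      · -- new element
        have hnmem : x ∉ ue := fun h => hc ((hinv x).mpr h)
        have hinv' : ∀ y : Int, ((ec.insert x 1).contains y) = true ↔ y ∈ ue ++ [x] := by
          intro y
          rw [PySem.Dict.contains_insert]
          constructor
          · intro h
            rcases (Bool.or_eq_true _ _).mp h with h | h
            · exact List.mem_append.mpr (Or.inr (by simp [eq_of_beq h]))
            · exact List.mem_append.mpr (Or.inl ((hinv y).mp h))
          · intro h
            rcases List.mem_append.mp h with h | h
            · exact (Bool.or_eq_true _ _).mpr (Or.inr ((hinv y).mpr h))
            · have hyx : y = x := by simpa using h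
              exact (Bool.or_eq_true _ _).mpr (Or.inl (by simp [hyx]))
        have hcf : ec.contains x = false := by
          cases h : ec.contains x
          · rfl
          · exact absurd h hc
        rw [pvLoopV_cons]
        simp only [hcf, Bool.false_eq_true, if_false]
        by_cases hbrk : ((ue ++ [x]).length : Int) = K
        · simp only [if_pos hbrk]
          have hL : (((ue ++ [x]).length : Nat) : Int) = (ue.length : Int) + 1 := by
            simp
          have hK : 0 < K := by omega
          have hKn : K.toNat = (ue ++ [x]).length := by omega
          rw [if_pos hK, pvDedFrom, if_neg hnmem]
          have : ue ++ x :: pvDedFrom (ue ++ [x]) r = (ue ++ [x]) ++ pvDedFrom (ue ++ [x]) r := by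
            simp
          rw [this, hKn, List.take_left]
        · simp only [if_neg hbrk]
          have hlen' : 0 < K → (((ue ++ [x]).length : Int)) < K := by
            have hL : (((ue ++ [x]).length : Nat) : Int) = (ue.length : Int) + 1 := by
              simp
            intro hK; have := hlen hK; omega
          rw [ih (ue ++ [x]) (ec.insert x 1) hinv' hlen']
          simp only [pvDedFrom, if_neg hnmem]
          have : ue ++ x :: pvDedFrom (ue ++ [x]) r = (ue ++ [x]) ++ pvDedFrom (ue ++ [x]) r := by
            simp
          rw [this]

-- B-side: keys of the move-to-end fold = distinct values ordered by last occurrence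
theorem pvKeysFilter (x : Int) (l : List (Int × Int)) :
    (l.filter (fun p => !p.1 == x)).map (fun p => p.1)
      = (l.map (fun p => p.1)).filter (fun y => y != x) := by
  induction l with
  | nil => rfl
  | cons p r ih => by_cases h : p.1 == x <;> simp [h, bne, ih]

theorem pvStep_keys (d : PySem.Dict Int Int) (x : Int) :
    ((d.erase x).insert x (0 : Int)).keys = d.keys.filter (fun y => y != x) ++ [x] := by
  have hc : (d.erase x).contains x = false := by
    simp [PySem.Dict.erase, PySem.Dict.contains, List.any_filter]
  rw [PySem.Dict.keys_insert_of_not_contains _ _ hc]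
  congr 1
  show (d.items.filter (fun p => !p.1 == x)).map (fun p => p.1) = _
  rw [pvKeysFilter]
  rfl

theorem pvFold_keys (arr : List Int) :
    (arr.foldl (fun d x => (d.erase x).insert x (0 : Int)) PySem.Dict.empty).keys
      = (pvDed arr.reverse).reverse := by
  induction arr using List.reverseRecOn with
  | nil => rfl
  | append_singleton arr x ih =>
      rw [List.foldl_append, List.foldl_cons, List.foldl_nil, pvStep_keys, ih]
      have h1 : (arr ++ [x]).reverse = x :: arr.reverse := by simp
      rw [h1]
      simp only [pvDed, List.reverse_cons]
      rw [← List.filter_reverse]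

theorem pvA_closed (arr : List Int) (K : Int) :
    last_k_unique_elements arr K =
      (if 0 < K then (pvDed arr.reverse).take K.toNat else pvDed arr.reverse).reverse := by
  unfold last_k_unique_elements
  rw [PySem.List.slice?_none_none_neg_one, Option.getD_some, pvLoopA_eq_loopV,
    pvMap_range_eq_reverse,
    pvLoopV_eq K arr.reverse [] PySem.Dict.empty (by intro x; simp) (by intro _; simp; omega)]
  have h : pvDedFrom [] arr.reverse = pvDed arr.reverse := by
    rw [pvDedFrom_eq_filter]; simp
  rw [h]
  split <;> simp

-- ===== VERDICT (by name: the statement is the Claim_ definition above) =====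
theorem last_k_unique_elements_spec : Claim_equal_last_k_unique_elements := by
  intro arr K _
  unfold Spec_last_k_unique_elements
  rw [pvA_closed]
  simp only [last_k_unique_elements_alt]
  rw [pvFold_keys]
  by_cases hK : 0 < K
  · simp only [if_pos hK]
    have hKc : (-K) = -((K.toNat : Nat) : Int) := by omega
    rw [hKc, PySem.List.slice_from_neg_natCast _ _ (by omega), List.reverse_take]
    simp
  · simp [if_neg hK]
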